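-- pv_equiv track=rewrite | github.com/naeemnew21/python-challenges | sudo.py | sumColAndCross
-- ===== SOURCE A (Python) =====
-- def sumColAndCross(i):
--     summ = []
--     '''sum columns '''
--     for count in range(len(i)) :
--         summ.append(sum([e[count] for e in i]))
--     '''sum cross '''
--     summ.append(sum(e[n] for e,n in zip(i , range(len(i)))))
--     summ.append(sum(e[n] for e,n in zip(i , range(len(i)-1 , -1 , -1))))
--     return summ
-- ===== SOURCE B (Python) =====
-- def sumColAndCross(i):
--     # single traversal: accumulate all column sums and both diagonals in one pass
--     n = len(i)
--     cols = [0] * n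
--     d1 = 0
--     d2 = 0
--     for idx, row in enumerate(i):
--         cols = [c + v for c, v in zip(cols, row[:n])]
--         d1 += row[idx]
--         d2 += row[n - 1 - idx]
--     return cols + [d1, d2]
-- ===== Notes on version B (the rewrite author's own statement) =====
-- stated objective: alternative
-- what changed: Replaces A's n+2 separate passes over the matrix (one list comprehension per column plus two zip-based diagonal generators) with a single traversal that carries a column-sum vector and both diagonal accumulators.
import Mathlib
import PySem

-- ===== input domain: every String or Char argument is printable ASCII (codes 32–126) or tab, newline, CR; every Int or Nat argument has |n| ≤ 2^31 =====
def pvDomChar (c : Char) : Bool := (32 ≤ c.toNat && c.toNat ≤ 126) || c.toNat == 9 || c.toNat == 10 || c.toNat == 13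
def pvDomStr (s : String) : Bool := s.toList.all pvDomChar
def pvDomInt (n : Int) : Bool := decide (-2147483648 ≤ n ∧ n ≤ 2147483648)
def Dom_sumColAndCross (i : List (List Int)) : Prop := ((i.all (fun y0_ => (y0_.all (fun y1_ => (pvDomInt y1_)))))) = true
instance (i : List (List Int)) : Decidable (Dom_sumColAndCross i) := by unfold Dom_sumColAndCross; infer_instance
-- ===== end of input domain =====

-- B computes the column sums and both diagonals in one traversal of the matrix instead of A's n+2 passes (alternative decomposition, same asymptotic cost).


-- ===== PORT A =====
def sumColAndCross (i : List (List Int)) : List Int :=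
  let summ : List Int :=
    (PySem.List.pyRange 0 i.length 1).foldl
      (fun summ count => summ ++ [(i.map (fun e => PySem.List.pyGetD e count 0)).sum]) []
  let summ := summ ++ [((i.zip (PySem.List.pyRange 0 i.length 1)).map
      (fun p => PySem.List.pyGetD p.1 p.2 0)).sum]
  let summ := summ ++ [((i.zip (PySem.List.pyRange ((i.length : Int) - 1) (-1) (-1))).map
      (fun p => PySem.List.pyGetD p.1 p.2 0)).sum]
  summ

-- ===== PORT B =====
def sumColAndCross_alt (i : List (List Int)) : List Int :=
  let n : Int := i.length
  let st :=
    (PySem.List.enumerate i).foldl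
      (fun st p =>
        ((st.1.zip (PySem.List.slice p.2 (some 0) (some n))).map (fun q => q.1 + q.2),
         st.2.1 + PySem.List.pyGetD p.2 p.1 0,
         st.2.2 + PySem.List.pyGetD p.2 (n - 1 - p.1) 0))
      (List.replicate i.length 0, 0, 0)
  st.1 ++ [st.2.1, st.2.2]

-- ===== PRECONDITION & SPEC =====
-- Pre_ excludes exactly the ragged matrices (some row shorter than the row count), on which the Python A raises IndexError.
def Pre_sumColAndCross (i : List (List Int)) : Prop := ∀ r ∈ i, i.length ≤ r.length
instance (i : List (List Int)) : Decidable (Pre_sumColAndCross i) := by unfold Pre_sumColAndCross; infer_instance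
def pvWitness_sumColAndCross : List (List Int) := [[1, 2], [3, 4]]
def Spec_sumColAndCross (i : List (List Int)) (out : List Int) : Prop := out = sumColAndCross_alt i
instance (i : List (List Int)) (out : List Int) : Decidable (Spec_sumColAndCross i out) := by unfold Spec_sumColAndCross; infer_instance

-- ===== CLAIM (what is proved, stated in full; the proofs are below) =====
def Claim_equal_sumColAndCross : Prop := ∀ (i : List (List Int)), Dom_sumColAndCross i → Pre_sumColAndCross i → Spec_sumColAndCross i (sumColAndCross i)

-- ===== LEMMAS AND PROOFS =====

-- zip with an ascending index range is enumerate with the components swapped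
theorem pv_zip_range_eq_enumerate (xs : List (List Int)) :
    ∀ (s : Int), xs.zip (PySem.List.pyRange s (s + xs.length) 1)
      = (PySem.List.enumerate xs s).map (fun p => (p.2, p.1)) := by
  induction xs with
  | nil => intro s; simp [PySem.List.enumerate_nil]
  | cons x t ih =>
    intro s
    rw [PySem.List.enumerate_cons]
    have h : PySem.List.pyRange s (s + (↑(t.length) + 1)) 1
        = s :: PySem.List.pyRange (s + 1) ((s + 1) + ↑(t.length)) 1 := by
      rw [show s + ((t.length : Int) + 1) = (s + 1) + (t.length : Int) by omega,
        PySem.List.pyRange_one_cons (by omega)]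
    simp only [List.length_cons, Nat.cast_add, Nat.cast_one, h, List.zip_cons_cons,
      List.map_cons, ih (s + 1)]

-- zip with a descending index range is enumerate with index k mapped to a + s - k
theorem pv_zip_range_neg_eq_enumerate (xs : List (List Int)) :
    ∀ (a s : Int), xs.zip (PySem.List.pyRange a (a - xs.length) (-1))
      = (PySem.List.enumerate xs s).map (fun p => (p.2, a + s - p.1)) := by
  induction xs with
  | nil => intro a s; simp [PySem.List.enumerate_nil]
  | cons x t ih =>
    intro a s
    rw [PySem.List.enumerate_cons]
    have h : PySem.List.pyRange a (a - (↑(t.length) + 1)) (-1)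
        = a :: PySem.List.pyRange (a - 1) ((a - 1) - ↑(t.length)) (-1) := by
      rw [show a - ((t.length : Int) + 1) = (a - 1) - (t.length : Int) by omega,
        PySem.List.pyRange_neg_one_cons (by omega)]
    simp only [List.length_cons, Nat.cast_add, Nat.cast_one, h, List.zip_cons_cons,
      List.map_cons, ih (a - 1) (s + 1)]
    congr 1
    · congr 1; omega
    · apply List.map_congr_left
      intro p _; congr 1; omega

-- the fold of B computes: per position the column sums added to the start vector, and each diagonal accumulator plus its sum
theorem pv_fold_state (m : Nat) :
    ∀ (rows : List (List Int)) (s : Int) (cols : List Int) (d1 d2 : Int),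
      cols.length = m → (∀ r ∈ rows, m ≤ r.length) →
      (PySem.List.enumerate rows s).foldl
        (fun st p =>
          ((st.1.zip (PySem.List.slice p.2 (some 0) (some (m : Int)))).map (fun q => q.1 + q.2),
           st.2.1 + PySem.List.pyGetD p.2 p.1 0,
           st.2.2 + PySem.List.pyGetD p.2 ((m : Int) - 1 - p.1) 0))
        (cols, d1, d2)
      = ((List.range m).map (fun c => cols.getD c 0 + (rows.map (fun r => r.getD c 0)).sum),
         d1 + ((PySem.List.enumerate rows s).map (fun p => PySem.List.pyGetD p.2 p.1 0)).sum,
         d2 + ((PySem.List.enumerate rows s).map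
            (fun p => PySem.List.pyGetD p.2 ((m : Int) - 1 - p.1) 0)).sum) := by
  intro rows
  induction rows with
  | nil =>
    intro s cols d1 d2 hlen _
    simp only [PySem.List.enumerate_nil, List.foldl_nil, List.map_nil, List.sum_nil, add_zero]
    refine congrArg (fun c => (c, d1, d2)) ?_
    apply List.ext_getElem
    · simp [hlen]
    · intro k h1 h2
      simp_all [List.getD_eq_getElem?_getD, List.getElem?_eq_getElem (by omega : k < cols.length)]
  | cons r t ih =>
    intro s cols d1 d2 hlen hrows
    rw [PySem.List.enumerate_cons, List.foldl_cons]
    have hr : m ≤ r.length := hrows r (by simp)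
    have hslice : PySem.List.slice r (some 0) (some (m : Int)) = r.take m := by
      rw [PySem.List.slice_zero_start, PySem.List.slice_to_natCast]
    have hlen1 : ((cols.zip (PySem.List.slice r (some 0) (some (m : Int)))).map
        (fun q => q.1 + q.2)).length = m := by
      simp [hslice, hlen]; omega
    rw [ih (s + 1) _ _ _ hlen1 (fun x hx => hrows x (by simp [hx]))]
    simp only [List.map_cons, List.sum_cons, Prod.mk.injEq]
    refine ⟨?_, by ring, by ring⟩
    apply List.map_congr_left
    intro c hc
    have hcm : c < m := List.mem_range.mp hc
    have hgd : ((cols.zip (PySem.List.slice r (some 0) (some (m : Int)))).map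
        (fun q => q.1 + q.2)).getD c 0 = cols.getD c 0 + r.getD c 0 := by
      rw [hslice]
      have h1 : c < (cols.zip (r.take m)).length := by simp [hlen]; omega
      rw [List.getD_eq_getElem?_getD, List.getElem?_map,
        List.getElem?_eq_getElem h1, List.getElem_zip]
      simp [List.getD_eq_getElem?_getD,
        List.getElem?_eq_getElem (by omega : c < cols.length),
        List.getElem?_eq_getElem (by omega : c < r.length)]
    rw [hgd]
    simp [add_assoc]

-- ===== VERDICT (by name: the statement is the Claim_ definition above) =====
theorem sumColAndCross_spec : Claim_equal_sumColAndCross := by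
  intro i _ hpre
  unfold Spec_sumColAndCross sumColAndCross sumColAndCross_alt
  dsimp only
  rw [pv_fold_state i.length i 0 (List.replicate i.length 0) 0 0 (by simp) hpre]
  rw [PySem.List.foldl_append_singleton_eq_map, List.nil_append]
  have hzip1 := pv_zip_range_eq_enumerate i 0
  rw [zero_add] at hzip1
  have hzip2 := pv_zip_range_neg_eq_enumerate i ((i.length : Int) - 1) 0
  rw [show (i.length : Int) - 1 - (i.length : Int) = -1 by omega] at hzip2
  rw [hzip1, hzip2, List.map_map, List.map_map]
  simp only [zero_add, List.append_assoc, List.singleton_append]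
  congr 1
  · -- column sums
    rw [PySem.List.pyRange_one, List.map_map]
    apply List.map_congr_left
    intro k _
    simp [List.getD_eq_getElem?_getD]
  · congr 2
    congr 1
    apply List.map_congr_left
    intro p _
    simp only [Function.comp]
    congr 1
    omega
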